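-- pv_equiv track=rewrite | github.com/TheAlgorithms/Python | other/maximum_subsequence.py | max_subsequence_sum
-- ===== SOURCE A (Python) =====
-- from collections.abc import Sequence
--
-- def max_subsequence_sum(nums: Sequence[int] | None = None) -> int:
--     """Return the maximum possible sum amongst all non - empty subsequences.
--
--     Raises:
--       ValueError: when nums is empty.
--
--     >>> max_subsequence_sum([1,2,3,4,-2])
--     10
--     >>> max_subsequence_sum([-2, -3, -1, -4, -6])
--     -1
--     >>> max_subsequence_sum([])
--     Traceback (most recent call last):
--         . . .
--     ValueError: Input sequence should not be empty
--     >>> max_subsequence_sum()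
--     Traceback (most recent call last):
--         . . .
--     ValueError: Input sequence should not be empty
--     """
--     if nums is None or not nums:
--         raise ValueError("Input sequence should not be empty")
--
--     ans = nums[0]
--     for i in range(1, len(nums)):
--         num = nums[i]
--         ans = max(ans, ans + num, num)
--
--     return ans
-- ===== SOURCE B (Python) =====
-- def max_subsequence_sum(nums=None):
--     if nums is None or not nums:
--         raise ValueError("Input sequence should not be empty")
--     positives = [x for x in nums if x > 0]
--     if positives:
--         return sum(positives)
--     return max(nums)
-- ===== Notes on version B (the rewrite author's own statement) =====
-- stated objective: simpler
-- what changed: Replaces the running three-way-max DP loop with a direct sum of the strictly positive elements, falling back to max(nums) when no element is positive.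
import Mathlib
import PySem

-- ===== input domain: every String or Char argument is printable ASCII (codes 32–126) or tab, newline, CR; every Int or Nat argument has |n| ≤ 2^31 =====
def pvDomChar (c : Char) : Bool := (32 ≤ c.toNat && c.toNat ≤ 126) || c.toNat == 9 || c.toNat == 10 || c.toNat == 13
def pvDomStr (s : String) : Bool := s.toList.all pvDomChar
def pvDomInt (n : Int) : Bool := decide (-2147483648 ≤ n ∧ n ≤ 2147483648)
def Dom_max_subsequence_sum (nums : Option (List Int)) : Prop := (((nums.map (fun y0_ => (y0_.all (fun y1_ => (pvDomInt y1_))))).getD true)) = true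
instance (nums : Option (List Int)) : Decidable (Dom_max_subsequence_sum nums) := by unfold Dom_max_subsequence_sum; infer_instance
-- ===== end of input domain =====

-- B replaces A's running three-way-max loop by summing the strictly positive elements
-- (falling back to max(nums) when none is positive); objective: simpler.
-- Both Pythons raise ValueError on None/empty input; Pre_ excludes exactly those inputs.

-- ===== PORT A =====
-- ans = max(ans, ans + num, num), folded over nums[1:] starting from nums[0]
def max_subsequence_sum (nums : Option (List Int)) : Int :=
  match nums with
  | none => 0        -- raises ValueError in Python; excluded by Pre_
  | some l =>
    match l with
    | [] => 0        -- raises ValueError in Python; excluded by Pre_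
    | a :: t => t.foldl (fun ans num => max (max ans (ans + num)) num) a

-- ===== PORT B =====
def max_subsequence_sum_alt (nums : Option (List Int)) : Int :=
  match nums with
  | none => 0        -- raises ValueError in Python; excluded by Pre_
  | some l =>
    let positives := l.filter (fun x => decide (0 < x))
    if positives ≠ [] then positives.sum
    else (PySem.List.max? l (fun y => y)).getD 0   -- max(nums); getD unreachable inside Pre_

-- ===== PRECONDITION & SPEC =====
-- Pre_ excludes exactly the inputs on which A (and B) raise ValueError: None and the empty list.
def Pre_max_subsequence_sum (nums : Option (List Int)) : Prop := nums.getD [] ≠ []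
instance (nums : Option (List Int)) : Decidable (Pre_max_subsequence_sum nums) := by unfold Pre_max_subsequence_sum; infer_instance
def pvWitness_max_subsequence_sum : Option (List Int) := some [1, -2, 3]

def Spec_max_subsequence_sum (nums : Option (List Int)) (out : Int) : Prop := out = max_subsequence_sum_alt nums
instance (nums : Option (List Int)) (out : Int) : Decidable (Spec_max_subsequence_sum nums out) := by unfold Spec_max_subsequence_sum; infer_instance

-- ===== CLAIM (what is proved, stated in full; the proofs are below) =====
def Claim_equal_max_subsequence_sum : Prop := ∀ (nums : Option (List Int)), Dom_max_subsequence_sum nums → Pre_max_subsequence_sum nums → Spec_max_subsequence_sum nums (max_subsequence_sum nums)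

-- ===== LEMMAS AND PROOFS =====

-- B's value of the nonempty list h :: r, as a function of head and tail.
def pvBv (h : Int) (r : List Int) : Int :=
  if ((h :: r).filter (fun x => decide (0 < x))) = [] then r.foldl max h
  else ((h :: r).filter (fun x => decide (0 < x))).sum

theorem pvBv_nil (h : Int) : pvBv h [] = h := by
  by_cases hp : 0 < h <;> simp [pvBv, hp]

theorem pv_filter_sum_pos (l : List Int) (hne : l.filter (fun x => decide (0 < x)) ≠ []) :
    0 < (l.filter (fun x => decide (0 < x))).sum := by
  refine List.sum_pos _ ?_ hne
  intro x hx
  have := List.of_mem_filter hx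
  simpa using this

theorem pv_foldl_max_nonpos (r : List Int) : ∀ h : Int, h ≤ 0 → (∀ x ∈ r, x ≤ 0) →
    r.foldl max h ≤ 0 := by
  induction r with
  | nil => intro h hh _; simpa using hh
  | cons a t ih =>
    intro h hh hall
    have ha : a ≤ 0 := hall a (by simp)
    simp only [List.foldl_cons]
    exact ih (max h a) (by omega) (fun x hx => hall x (by simp [hx]))

theorem pv_step (h : Int) (r : List Int) (n : Int) :
    max (max (pvBv h r) (pvBv h r + n)) n = pvBv h (r ++ [n]) := by
  have hfil : ((h :: (r ++ [n])).filter (fun x => decide (0 < x)))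
      = ((h :: r).filter (fun x => decide (0 < x))) ++ ([n].filter (fun x => decide (0 < x))) := by
    rw [← List.cons_append, List.filter_append]
  by_cases hn : 0 < n
  · by_cases hp : ((h :: r).filter (fun x => decide (0 < x))) = []
    · -- all previous elements ≤ 0, new value is n
      have hall : ∀ x ∈ h :: r, x ≤ 0 := by
        intro x hx
        have := List.filter_eq_nil_iff.mp hp x hx
        simpa using this
      have hle : pvBv h r ≤ 0 := by
        simp only [pvBv, hp, if_pos]
        exact pv_foldl_max_nonpos r h (hall h (by simp)) (fun x hx => hall x (by simp [hx]))
      have hnew : pvBv h (r ++ [n]) = n := by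
        simp [pvBv, hfil, hp, hn]
      rw [hnew]; omega
    · have hpos : 0 < pvBv h r := by
        simpa [pvBv, hp] using pv_filter_sum_pos (h :: r) hp
      have hnew : pvBv h (r ++ [n]) = pvBv h r + n := by
        simp [pvBv, hfil, hp, hn]
      rw [hnew]; omega
  · have hfil2 : ((h :: (r ++ [n])).filter (fun x => decide (0 < x)))
        = ((h :: r).filter (fun x => decide (0 < x))) := by
      simp [hfil, hn]
    by_cases hp : ((h :: r).filter (fun x => decide (0 < x))) = []
    · have hnew : pvBv h (r ++ [n]) = max (r.foldl max h) n := by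
        simp [pvBv, hfil2, hp, List.foldl_append]
      have hv : pvBv h r = r.foldl max h := by simp [pvBv, hp]
      rw [hnew, hv]; omega
    · have hpos : 0 < pvBv h r := by
        simpa [pvBv, hp] using pv_filter_sum_pos (h :: r) hp
      have hnew : pvBv h (r ++ [n]) = pvBv h r := by
        simp [pvBv, hfil2, hp]
      rw [hnew]; omega

theorem pv_fold (t : List Int) : ∀ (h : Int) (r : List Int),
    t.foldl (fun ans num => max (max ans (ans + num)) num) (pvBv h r) = pvBv h (r ++ t) := by
  induction t with
  | nil => intro h r; simp
  | cons n t ih =>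
    intro h r
    simp only [List.foldl_cons]
    rw [pv_step h r n, ih h (r ++ [n])]
    simp

-- ===== VERDICT (by name: the statement is the Claim_ definition above) =====
theorem max_subsequence_sum_spec : Claim_equal_max_subsequence_sum := by
  intro nums _ hpre
  unfold Spec_max_subsequence_sum
  match nums with
  | none => simp [Pre_max_subsequence_sum] at hpre
  | some [] => simp [Pre_max_subsequence_sum] at hpre
  | some (a :: t) =>
    have := pv_fold t a []
    rw [pvBv_nil] at this
    simp only [List.nil_append] at this
    show List.foldl (fun ans num => max (max ans (ans + num)) num) a t
      = max_subsequence_sum_alt (some (a :: t))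
    rw [this]
    unfold max_subsequence_sum_alt
    by_cases hp : ((a :: t).filter (fun x => decide (0 < x))) = []
    · simp [pvBv, hp, PySem.List.max?_id_cons]
    · simp [pvBv, hp]
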